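-- pv_equiv track=rewrite | github.com/menma-at-here/kyo-pro | ABC/111~120/116/116 C another.py | div_ary
-- ===== SOURCE A (Python) =====
-- def div_ary(h):
--     arys = []
--     zeropos = []
--
--     for i,hh in enumerate(h):
--         if hh == 0:
--             zeropos.append(i)
--
--     if len(zeropos) == 0:
--         return [h]
--     else:
--         tmpary = []
--         for i, hh in enumerate(h):
--             if hh == 0:
--                 arys.append(tmpary)
--                 tmpary = []
--             else:
--                 tmpary.append(hh)
--         arys.append(tmpary)
--     return arys
-- ===== SOURCE B (Python) =====
-- def div_ary(h):
--     zs = [i for i, x in enumerate(h) if x == 0]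
--     arys = []
--     start = 0
--     for z in zs:
--         arys.append(h[start:z])
--         start = z + 1
--     arys.append(h[start:])
--     return arys
-- ===== Notes on version B (the rewrite author's own statement) =====
-- stated objective: simpler
-- what changed: B computes the zero positions once and builds the segments by slicing h between consecutive zero boundaries, instead of A's element-by-element accumulator flushed at each zero plus a separate existence pass and special no-zero branch.
import Mathlib
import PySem

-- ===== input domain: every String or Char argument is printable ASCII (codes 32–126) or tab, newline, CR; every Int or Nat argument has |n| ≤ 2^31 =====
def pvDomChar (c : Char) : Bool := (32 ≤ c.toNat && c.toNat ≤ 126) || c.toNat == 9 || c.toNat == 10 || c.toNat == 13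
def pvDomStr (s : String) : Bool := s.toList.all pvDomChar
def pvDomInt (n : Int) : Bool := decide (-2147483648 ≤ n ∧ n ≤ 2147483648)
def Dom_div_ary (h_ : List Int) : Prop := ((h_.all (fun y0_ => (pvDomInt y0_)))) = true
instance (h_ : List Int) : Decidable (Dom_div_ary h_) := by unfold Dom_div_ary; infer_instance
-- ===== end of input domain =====

-- B replaces A's element-by-element accumulator (flushed at each zero) and its separate
-- existence pass by one zero-index pass plus boundary slicing; objective: simpler.


-- ===== PORT A =====
def div_ary (h_ : List Int) : List (List Int) :=
  let zeropos : List Int := (PySem.List.enumerate h_).foldl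
    (fun zp p => if p.2 = 0 then zp ++ [p.1] else zp) []
  if zeropos.length = 0 then [h_]
  else
    let r := (PySem.List.enumerate h_).foldl
      (fun (st : List (List Int) × List Int) p =>
        if p.2 = 0 then (st.1 ++ [st.2], ([] : List Int)) else (st.1, st.2 ++ [p.2]))
      ([], [])
    r.1 ++ [r.2]

-- ===== PORT B =====
def div_ary_alt (h_ : List Int) : List (List Int) :=
  let zs : List Int := ((PySem.List.enumerate h_).filter (fun p => p.2 == 0)).map (·.1)
  let r := zs.foldl
    (fun (st : List (List Int) × Int) z =>
      (st.1 ++ [PySem.List.slice h_ (some st.2) (some z)], z + 1))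
    (([], 0) : List (List Int) × Int)
  r.1 ++ [PySem.List.slice h_ (some r.2) none]

-- ===== PRECONDITION & SPEC =====
def Spec_div_ary (h_ : List Int) (out : List (List Int)) : Prop := out = div_ary_alt h_
instance (h_ : List Int) (out : List (List Int)) : Decidable (Spec_div_ary h_ out) := by unfold Spec_div_ary; infer_instance

-- ===== CLAIM (what is proved, stated in full; the proofs are below) =====
def Claim_equal_div_ary : Prop := ∀ (h_ : List Int), Dom_div_ary h_ → Spec_div_ary h_ (div_ary h_)

-- ===== LEMMAS AND PROOFS =====

/-- Reference splitter: segments of `h` between zeros. -/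
def splitZ : List Int → List (List Int)
  | [] => [[]]
  | x :: t =>
    if x = 0 then [] :: splitZ t
    else
      match splitZ t with
      | [] => [[x]]
      | s :: rest => (x :: s) :: rest

lemma splitZ_ne_nil (h : List Int) : splitZ h ≠ [] := by
  cases h with
  | nil => simp [splitZ]
  | cons x t =>
    simp only [splitZ]
    split_ifs
    · simp
    · cases splitZ t <;> simp

/-- Zero positions as naturals. -/
def zerosN : List Int → List Nat
  | [] => []
  | x :: t => if x = 0 then 0 :: (zerosN t).map (· + 1) else (zerosN t).map (· + 1)

lemma map_shift_cast (s : Int) (l : List Nat) :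
    ((l.map (fun k => k + 1) : List Nat)).map (fun (k : Nat) => s + (k : Int)) = l.map (fun (k : Nat) => (s + 1) + (k : Int)) := by
  rw [List.map_map]
  apply List.map_congr_left
  intro k _
  simp only [Function.comp]
  push_cast
  ring

lemma enum_filter_zeros (h : List Int) (s : Int) :
    ((PySem.List.enumerate h s).filter (fun p => p.2 == 0)).map (·.1)
      = (zerosN h).map (fun (k : Nat) => s + (k : Int)) := by
  induction h generalizing s with
  | nil => simp [PySem.List.enumerate_nil, zerosN]
  | cons x t ih =>
    rw [PySem.List.enumerate_cons]
    by_cases hx : x = 0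
    · simp only [List.filter_cons, zerosN, hx, beq_self_eq_true, if_true, List.map_cons,
        Nat.cast_zero, add_zero, map_shift_cast]
      rw [ih (s + 1)]
    · simp only [List.filter_cons, zerosN, hx, if_false, map_shift_cast]
      have hb : ((s, x).2 == 0) = false := by simpa using hx
      rw [hb]
      simp only [Bool.false_eq_true, if_false]
      exact ih (s + 1)

/-- B's per-zero boundary recursion. -/
def gB (h : List Int) : List Int → Int → List (List Int)
  | [], start => [PySem.List.slice h (some start) none]
  | z :: rest, start => PySem.List.slice h (some start) (some z) :: gB h rest (z + 1)

lemma foldB_eq_gB (h : List Int) (zs : List Int) (acc : List (List Int)) (start : Int) :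
    (let r := zs.foldl
      (fun (st : List (List Int) × Int) z =>
        (st.1 ++ [PySem.List.slice h (some st.2) (some z)], z + 1)) (acc, start)
     r.1 ++ [PySem.List.slice h (some r.2) none])
      = acc ++ gB h zs start := by
  induction zs generalizing acc start with
  | nil => simp [gB]
  | cons z rest ih => simp [gB, ih]

lemma gB_shift (x : Int) (t : List Int) (zs : List Nat) (s : Nat) :
    gB (x :: t) ((zs.map (fun k => k + 1)).map (fun (k : Nat) => (k : Int))) ((s + 1 : Nat) : Int)
      = gB t (zs.map (fun (k : Nat) => (k : Int))) (s : Int) := by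
  induction zs generalizing s with
  | nil =>
    simp only [List.map_nil, gB, PySem.List.slice_from_natCast, List.drop_succ_cons]
  | cons z rest ih =>
    simp only [List.map_cons, gB, PySem.List.slice_natCast, List.drop_succ_cons]
    have h3 : z + 1 - (s + 1) = z - s := by omega
    have hc : ((z + 1 : Nat) : Int) + 1 = (((z + 1) + 1 : Nat) : Int) := by push_cast; ring
    have hc2 : ((z : Nat) : Int) + 1 = ((z + 1 : Nat) : Int) := by push_cast; ring
    rw [h3, hc, hc2]
    exact congrArg _ (ih (z + 1))

lemma zerosN_nil_splitZ (t : List Int) (h0 : zerosN t = []) : splitZ t = [t] := by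
  induction t with
  | nil => simp [splitZ]
  | cons x t ih =>
    by_cases hx : x = 0
    · simp [zerosN, hx] at h0
    · simp only [zerosN, hx, if_false, List.map_eq_nil_iff] at h0
      simp [splitZ, hx, ih h0]

lemma splitZ_cons_zero (t : List Int) : splitZ ((0 : Int) :: t) = [] :: splitZ t := by
  simp [splitZ]

lemma splitZ_cons_ne {x : Int} (hx : x ≠ 0) {t : List Int} {s : List Int}
    {r : List (List Int)} (hs : splitZ t = s :: r) : splitZ (x :: t) = (x :: s) :: r := by
  simp [splitZ, hx, hs]

lemma gB_zeros (h : List Int) :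
    gB h ((zerosN h).map (fun (k : Nat) => (k : Int))) 0 = splitZ h := by
  induction h with
  | nil => simp [zerosN, gB, splitZ, PySem.List.slice_from]
  | cons x t ih =>
    by_cases hx : x = 0
    · subst hx
      rw [splitZ_cons_zero]
      simp only [zerosN, if_pos rfl, List.map_cons, Nat.cast_zero, gB]
      have sh := gB_shift 0 t (zerosN t) 0
      norm_num at sh ⊢
      simp only [gB]
      have e0 : PySem.List.slice ((0 : Int) :: t) (some (0 : Int)) (some (0 : Int)) = [] := by
        rw [PySem.List.slice_zero_start,
          show ((0:Int)) = ((0:Nat):Int) from rfl, PySem.List.slice_to_natCast]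
        simp
      rw [e0, zero_add, sh, ih]
    · cases hz : zerosN t with
      | nil =>
        rw [hz] at ih
        simp only [zerosN, hx, if_false, hz, List.map_nil, gB]
        rw [zerosN_nil_splitZ (x :: t) (by simp [zerosN, hx, hz])]
        simp [PySem.List.slice_from]
      | cons z rest =>
        rw [hz] at ih
        simp only [List.map_cons, gB, Nat.cast_zero] at ih
        rw [splitZ_cons_ne hx ih.symm]
        simp only [zerosN, hx, if_false, hz, List.map_cons, gB]
        have hA : ((z + 1 : Nat) : Int) + 1 = (((z + 1) + 1 : Nat) : Int) := by push_cast; ring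
        have hB : ((z : Nat) : Int) + 1 = ((z + 1 : Nat) : Int) := by push_cast; ring
        rw [hA, gB_shift x t rest (z + 1), ← hB]
        congr 1
        rw [hB]
        simp only [PySem.List.slice_zero_start, PySem.List.slice_to_natCast]
        simp

lemma alt_eq_splitZ (h : List Int) : div_ary_alt h = splitZ h := by
  unfold div_ary_alt
  rw [show (PySem.List.enumerate h) = PySem.List.enumerate h 0 from rfl]
  have := foldB_eq_gB h (((PySem.List.enumerate h 0).filter (fun p => p.2 == 0)).map (·.1)) [] 0
  simp only at this ⊢
  rw [this, enum_filter_zeros h 0]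
  simp only [zero_add, List.nil_append]
  exact gB_zeros h

-- A's main loop, with the (unused) enumerate index stripped.
lemma foldA_enum (h : List Int) (s : Int) (st : List (List Int) × List Int) :
    (PySem.List.enumerate h s).foldl
      (fun (st : List (List Int) × List Int) p =>
        if p.2 = 0 then (st.1 ++ [st.2], ([] : List Int)) else (st.1, st.2 ++ [p.2])) st
    = h.foldl
      (fun (st : List (List Int) × List Int) x =>
        if x = 0 then (st.1 ++ [st.2], ([] : List Int)) else (st.1, st.2 ++ [x])) st := by
  induction h generalizing s st with
  | nil => simp [PySem.List.enumerate_nil]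
  | cons x t ih => simp [PySem.List.enumerate_cons, ih]

lemma foldA_splitZ (h : List Int) (arys : List (List Int)) (tmp : List Int) :
    (let r := h.foldl
      (fun (st : List (List Int) × List Int) x =>
        if x = 0 then (st.1 ++ [st.2], ([] : List Int)) else (st.1, st.2 ++ [x])) (arys, tmp)
     r.1 ++ [r.2])
    = arys ++ (match splitZ h with
               | [] => [tmp]
               | s :: rest => (tmp ++ s) :: rest) := by
  induction h generalizing arys tmp with
  | nil => simp [splitZ]
  | cons x t ih =>
    by_cases hx : x = 0
    · simp only [List.foldl_cons, hx, if_true, splitZ]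
      rw [ih]
      cases hs : splitZ t with
      | nil => exact absurd hs (splitZ_ne_nil t)
      | cons s rest => simp
    · simp only [List.foldl_cons, hx, if_false, splitZ]
      rw [ih]
      cases hs : splitZ t with
      | nil => exact absurd hs (splitZ_ne_nil t)
      | cons s rest => simp

lemma zeropos_nil_iff (h : List Int) :
    ((PySem.List.enumerate h 0).foldl
      (fun zp p => if p.2 = 0 then zp ++ [p.1] else zp) ([] : List Int)) = []
      ↔ zerosN h = [] := by
  have e : ∀ (l : List (Int × Int)) (acc : List Int),
      l.foldl (fun zp p => if p.2 = 0 then zp ++ [p.1] else zp) acc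
        = acc ++ (l.filter (fun p => p.2 == 0)).map (·.1) := by
    intro l acc
    induction l generalizing acc with
    | nil => simp
    | cons p rest ih => by_cases hp : p.2 = 0 <;> simp [hp, ih]
  rw [e, enum_filter_zeros h 0]
  simp

lemma a_eq_splitZ (h : List Int) : div_ary h = splitZ h := by
  unfold div_ary
  simp only []
  split_ifs with hlen
  · have hzn := (zeropos_nil_iff h).mp (List.length_eq_zero_iff.mp hlen)
    rw [zerosN_nil_splitZ h hzn]
  · rw [foldA_enum h 0 ([], [])]
    have hf := foldA_splitZ h [] []
    simp only [List.nil_append] at hf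
    rw [hf]
    obtain ⟨s, rest, hs⟩ := List.exists_cons_of_ne_nil (splitZ_ne_nil h)
    rw [hs]

-- ===== VERDICT (by name: the statement is the Claim_ definition above) =====
theorem div_ary_spec : Claim_equal_div_ary := by
  intro h _
  unfold Spec_div_ary
  rw [a_eq_splitZ, alt_eq_splitZ]
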